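-- pv_equiv track=rewrite | github.com/therefromhere/xmas_puzzle | iter.py | partition_buckets_unique
-- ===== SOURCE A (Python) =====
-- def rule_asc_len(number, buckets):
--     """
--     From http://math.stackexchange.com/a/28371
--     :param number:
--     :param buckets:
--     :return:
--     """
--     a = [0 for i in range(number + 1)]
--     k = 1
--     a[0] = 0
--     a[1] = number
--     while k != 0:
--         x = a[k - 1] + 1
--         y = a[k] - 1
--         k -= 1
--         while x <= y and k < buckets - 1:
--             a[k] = x
--             y -= x
--             k += 1
--         a[k] = x + y
--         yield tuple(a[:k + 1])
--
-- def partition_buckets_unique(number, buckets):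
--     """
--     unique ways of partitioning number into buckets (independent of bucket position)
--
--     >>> sorted(partition_buckets_unique(1, 3))
--     [(1, 0, 0)]
--
--     >>> sorted(partition_buckets_unique(2, 3))
--     [(1, 1, 0), (2, 0, 0)]
--
--     >>> sorted(partition_buckets_unique(5, 1))
--     [(5,)]
--
--     >>> sorted(partition_buckets_unique(0, 2))
--     [(0, 0)]
--
--     :param number:
--     :param buckets:
--     :return:
--     """
--
--     if number == 0:
--         yield (0,) * buckets
--         return
--
--     for p in rule_asc_len(number, buckets):
--         pad_len = buckets - len(p)
--         if pad_len > 0: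
--             p = p + (0,) * pad_len
--
--         yield p
-- ===== SOURCE B (Python) =====
-- def partition_buckets_unique(number, buckets):
--     """
--     unique ways of partitioning number into buckets (independent of bucket position)
--
--     Iterative depth-first descent: a frame (d, n, k, p) stands for "emit the ascending
--     partitions of n into at most k parts, each part >= p, behind the first d parts of
--     `path`"; a branch on part p pushes its sibling (p+1) below the subtree, and a frame
--     whose guard fails emits path[:d] + (n,).  The partitions come out in the same order
--     as the source's generator; each is padded with zeros to `buckets` entries.
--     """
--     if number == 0:
--         yield (0,) * buckets
--         return
--
--     path = []
--     stack = [(0, number, buckets, 1)]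
--     while stack:
--         d, n, k, p = stack.pop()
--         if k > 1 and p <= n - p:
--             stack.append((d, n, k, p + 1))
--             stack.append((d + 1, n - p, k - 1, p))
--             del path[d:]
--             path.append(p)
--         else:
--             part = tuple(path[:d]) + (n,)
--             yield part + (0,) * (buckets - len(part))
-- ===== Notes on version B (the rewrite author's own statement) =====
-- stated objective: alternative
-- what changed: Replaces the imperative accelAsc-style array/while-loop generator (mutable list a, index k, inner redistribution loop) by a recursive generator rec(n,k,min_p) that enumerates ascending partitions by branching on the smallest part, subtrees first and (n,) last; the driver pads with zeros.
import Mathlib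
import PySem

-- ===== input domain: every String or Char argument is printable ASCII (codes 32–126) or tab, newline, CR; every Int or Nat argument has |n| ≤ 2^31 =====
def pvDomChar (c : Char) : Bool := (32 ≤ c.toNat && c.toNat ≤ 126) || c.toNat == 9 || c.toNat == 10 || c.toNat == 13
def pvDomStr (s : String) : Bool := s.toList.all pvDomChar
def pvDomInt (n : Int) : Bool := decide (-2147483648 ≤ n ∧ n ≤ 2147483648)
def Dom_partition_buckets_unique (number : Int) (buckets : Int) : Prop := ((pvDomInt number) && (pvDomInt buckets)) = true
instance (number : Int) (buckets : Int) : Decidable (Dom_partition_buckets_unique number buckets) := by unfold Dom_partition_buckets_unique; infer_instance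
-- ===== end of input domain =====

-- B replaces A's imperative array/while partition generator by a recursive descent on the
-- smallest part (same output order); equivalence of the return sequences is proved below.

-- ===== PORT A =====
-- inner `while x <= y and k < buckets - 1: a[k] = x; y -= x; k += 1`
-- (list indices are in range on every input admitted by Pre_, so List.set is exact here)
def pbuInner (b : Int) (a : List Int) (x y : Int) (k : Nat) : List Int × Int × Nat :=
  if x ≤ y ∧ (k : Int) < b - 1 then
    pbuInner b (a.set k x) x (y - x) (k + 1)
  else (a, y, k)
termination_by (b - 1 - (k : Int)).toNat
decreasing_by omega

-- outer `while k != 0` of rule_asc_len; fuel bounds the number of iterations (= number of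
-- yielded partitions) and is proved sufficient below — it does not change the computation.
def pbuLoop (b : Int) (fuel : Nat) (a : List Int) (k : Nat) : List (List Int) :=
  match fuel with
  | 0 => []
  | f + 1 =>
    if k = 0 then []
    else
      let x := a.getD (k - 1) 0 + 1
      let y := a.getD k 0 - 1
      match pbuInner b a x y (k - 1) with
      | (a1, y1, k1) =>
        let a2 := a1.set k1 (x + y1)
        (a2.take (k1 + 1)) :: pbuLoop b f a2 k1

def partition_buckets_unique (number : Int) (buckets : Int) : List (List Int) :=
  if number = 0 then [List.replicate buckets.toNat 0]
  else
    -- a = [0 for i in range(number+1)]; a[0] = 0; a[1] = number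
    let a := ((List.replicate (number + 1).toNat 0).set 0 0).set 1 number
    (pbuLoop buckets (2 ^ number.toNat) a 1).map (fun p =>
      let padLen : Int := buckets - (p.length : Int)
      if padLen > 0 then p ++ List.replicate padLen.toNat 0 else p)

-- ===== PORT B =====
-- the `while stack` loop of B; a frame is (d, n, k, p), Python's stack top (end of the
-- list) is the head here, and `del path[d:]; path.append(p)` is `path.take d ++ [p]`;
-- fuel bounds the number of loop iterations and is proved sufficient below — it does not
-- change the computation.
def pbuStack (bk : Int) (fuel : Nat) (path : List Int) (stack : List (Nat × Int × Int × Int)) :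
    List (List Int) :=
  match fuel, stack with
  | 0, _ => []
  | _, [] => []
  | f + 1, (d, n, k, p) :: rest =>
    if 1 < k ∧ p ≤ n - p then
      pbuStack bk f (path.take d ++ [p]) ((d + 1, n - p, k - 1, p) :: (d, n, k, p + 1) :: rest)
    else
      let part := path.take d ++ [n]
      (part ++ List.replicate (bk - (part.length : Int)).toNat 0) :: pbuStack bk f path rest

def partition_buckets_unique_alt (number : Int) (buckets : Int) : List (List Int) :=
  if number = 0 then [List.replicate buckets.toNat 0]
  else pbuStack buckets (2 ^ (number.toNat + 1)) [] [(0, number, buckets, 1)]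

-- ===== PRECONDITION & SPEC =====
-- Pre_ excludes number < 0, on which A raises IndexError (a = [] there, so a[0] = 0 fails).
def Pre_partition_buckets_unique (number : Int) (buckets : Int) : Prop := 0 ≤ number
instance (number : Int) (buckets : Int) : Decidable (Pre_partition_buckets_unique number buckets) := by unfold Pre_partition_buckets_unique; infer_instance
def pvWitness_partition_buckets_unique : Int × Int := (5, 3)

def Spec_partition_buckets_unique (number : Int) (buckets : Int) (out : List (List Int)) : Prop := out = partition_buckets_unique_alt number buckets
instance (number : Int) (buckets : Int) (out : List (List Int)) : Decidable (Spec_partition_buckets_unique number buckets out) := by unfold Spec_partition_buckets_unique; infer_instance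

-- ===== CLAIM (what is proved, stated in full; the proofs are below) =====
def Claim_equal_partition_buckets_unique : Prop := ∀ (number : Int) (buckets : Int), Dom_partition_buckets_unique number buckets → Pre_partition_buckets_unique number buckets → Spec_partition_buckets_unique number buckets (partition_buckets_unique number buckets)

-- ===== LEMMAS AND PROOFS =====

-- pbuRec is B's branch tree written as a plain recursion; both B's stack machine and A's
-- loop are proved below to enumerate it.
-- rec(n, k, p): ascending partitions of n into at most k parts, each ≥ p, subtrees first, (n,) last
def pbuRec (n : Int) (k : Int) (p : Int) : List (List Int) :=
  if 1 < k ∧ p ≤ n - p then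
    ((pbuRec (n - p) (k - 1) p).map (fun rest => p :: rest)) ++ pbuRec n k (p + 1)
  else [[n]]
termination_by (k.toNat, (n - 2 * p + 1).toNat)
decreasing_by
  · exact Prod.Lex.left _ _ (by omega)
  · exact Prod.Lex.right _ (by omega)


-- `pbuRem b n pref` = the partitions still to be emitted by A's loop after it has just
-- yielded the partition `pref ++ [n - pref.sum]` (deepest pending branches first).
def pbuRem (b n : Int) : List Int → List (List Int)
  | [] => []
  | p :: tl => ((pbuRem (b - 1) (n - p) tl).map (fun r => p :: r)) ++ pbuRec n b (p + 1)


-- ---- small list facts ----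

theorem pbu_one_le_sum (l : List Int) (h : ∀ x ∈ l, 1 ≤ x) : (l.length : Int) ≤ l.sum := by
  induction l with
  | nil => simp
  | cons x t ih =>
    have hx := h x (by simp)
    have ht := ih (fun z hz => h z (by simp [hz]))
    simp only [List.length_cons, List.sum_cons]
    push_cast
    omega

theorem pbu_sum_len (l : List Int) (h0 : ∀ x ∈ l, 0 ≤ x) (h1 : ∀ x ∈ l.drop 1, 1 ≤ x) :
    (l.length : Int) - 1 ≤ l.sum := by
  cases l with
  | nil => simp
  | cons x t =>
    have hx := h0 x (by simp)
    have ht := pbu_one_le_sum t (by simpa using h1)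
    simp only [List.length_cons, List.sum_cons]
    push_cast
    omega

theorem pbu_take_set_self (a : List Int) (j : Nat) (v : Int) : (a.set j v).take j = a.take j := by
  induction a generalizing j with
  | nil => simp
  | cons x t ih =>
    cases j with
    | zero => simp
    | succ j' => simpa using ih j'

theorem pbu_take_succ_set (a : List Int) (j : Nat) (v : Int) (h : j < a.length) :
    (a.set j v).take (j + 1) = a.take j ++ [v] := by
  induction a generalizing j with
  | nil => simp at h
  | cons x t ih =>
    cases j with
    | zero => simp
    | succ j' =>
      simp only [List.set, List.take_succ_cons, List.cons_append]
      rw [ih j' (by simpa using h)]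

theorem pbu_take_succ_getD (a : List Int) (j : Nat) (h : j < a.length) :
    a.take (j + 1) = a.take j ++ [a.getD j 0] := by
  induction a generalizing j with
  | nil => simp at h
  | cons x t ih =>
    cases j with
    | zero => simp
    | succ j' =>
      simp only [List.take_succ_cons, List.getD_cons_succ, List.cons_append]
      rw [ih j' (by simpa using h)]

-- ---- facts about pbuRec ----

theorem pbuRec_ne_nil (n k p : Int) : pbuRec n k p ≠ [] := by
  fun_induction pbuRec n k p with
  | case1 n k p h ih1 ih2 => simp_all
  | case2 n k p h => simp

theorem pbuRec_length (n k p : Int) (hp : 1 ≤ p) :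
    (pbuRec n k p).length ≤ 2 ^ (n - p).toNat := by
  fun_induction pbuRec n k p with
  | case2 n k p h => simpa using Nat.one_le_two_pow
  | case1 n k p h ih1 ih2 =>
    have h1 := ih1 hp
    have h2 := ih2 (by omega)
    rw [List.length_append, List.length_map]
    have e1 : (n - p - p).toNat ≤ (n - p - 1).toNat := by omega
    have e2 : (n - p).toNat = (n - p - 1).toNat + 1 := by omega
    calc (pbuRec (n - p) (k - 1) p).length + (pbuRec n k (p + 1)).length
        ≤ 2 ^ (n - p - p).toNat + 2 ^ (n - (p + 1)).toNat := by omega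
      _ ≤ 2 ^ (n - p - 1).toNat + 2 ^ (n - p - 1).toNat := by
          have := Nat.pow_le_pow_right (by norm_num : 1 ≤ 2) e1
          have e3 : n - (p+1) = n - p - 1 := by ring
          rw [e3]; omega
      _ = 2 ^ (n - p).toNat := by rw [e2, Nat.pow_succ]; ring

-- ---- the snoc decomposition of pbuRem ----

theorem pbuRem_snoc (b n : Int) (pref : List Int) (p : Int) :
    pbuRem b n (pref ++ [p]) =
      ((pbuRec (n - pref.sum) (b - (pref.length : Int)) (p + 1)).map (fun r => pref ++ r))
        ++ pbuRem b n pref := by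
  induction pref generalizing b n with
  | nil => simp [pbuRem]
  | cons q tl ih =>
    have e1 : b - ((q :: tl).length : Int) = (b - 1) - (tl.length : Int) := by
      simp only [List.length_cons]; push_cast; ring
    have e2 : n - (q :: tl).sum = (n - q) - tl.sum := by simp only [List.sum_cons]; ring
    simp only [List.cons_append, pbuRem, ih, e1, e2, List.map_append, List.map_map,
      List.append_assoc]
    congr 1


theorem pbu_mem_drop_append (l : List Int) (v x : Int) (hx : x ∈ (l ++ [v]).drop 1) :
    x ∈ l.drop 1 ∨ x = v := by
  cases l with
  | nil => simp at hx
  | cons c t => simp at hx ⊢; tauto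

theorem pbu_mem_drop_append_left (l r : List Int) (x : Int) (hx : x ∈ l.drop 1) :
    x ∈ (l ++ r).drop 1 := by
  cases l with
  | nil => simp at hx
  | cons c t => simp at hx ⊢; exact Or.inl hx

-- One outer-loop body of A, read as a descent into B's recursion tree: starting the inner
-- loop at level j with minimum part q and slack y, A yields the first partition of
-- pbuRec (q+y) (b-j) q (prefixed by a.take j) and leaves a state whose pending output is
-- pbuRem of the new prefix; all loop invariants are carried along.
theorem pbu_descent (b n : Int) (j : Nat) (a : List Int) (q y : Int) :
    a.length = (n + 1).toNat →
    j ≤ a.length →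
    1 ≤ q → 0 ≤ y →
    (a.take j).sum + q + y = n →
    (∀ x ∈ a.take j, 0 ≤ x) →
    (∀ x ∈ (a.take j).drop 1, 1 ≤ x) →
    (match pbuInner b a q y j with
     | (a1, y1, j1) =>
      ((pbuRec (q + y) (b - (j : Int)) q).map (fun r => a.take j ++ r) ++ pbuRem b n (a.take j)
          = ((a1.set j1 (q + y1)).take (j1 + 1)) :: pbuRem b n ((a1.set j1 (q + y1)).take j1))
        ∧ (a1.set j1 (q + y1)).length = (n + 1).toNat
        ∧ (a1.set j1 (q + y1)).take (j1 + 1) = (a1.set j1 (q + y1)).take j1 ++ [q + y1]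
        ∧ ((a1.set j1 (q + y1)).take (j1 + 1)).sum = n
        ∧ (∀ x ∈ (a1.set j1 (q + y1)).take j1, 0 ≤ x)
        ∧ (∀ x ∈ ((a1.set j1 (q + y1)).take j1).drop 1, 1 ≤ x)
        ∧ 1 ≤ q + y1) := by
  fun_induction pbuInner b a q y j with
  | case1 a y j hguard ih =>
    intro hlen hjl hq hy hsum h0 h1
    have hlt : ((a.take j).length : Int) = (j : Int) := by
      rw [List.length_take]; omega
    have hsl := pbu_sum_len (a.take j) h0 h1
    rw [hlt] at hsl
    have hjn : (j : Int) + 1 ≤ n := by omega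
    have hjlt : j < a.length := by omega
    have hts : (a.set j q).take (j + 1) = a.take j ++ [q] := pbu_take_succ_set a j q hjlt
    have ihh := ih (by simpa using hlen) (by simp; omega) hq (by omega)
      (by rw [hts]; simp; omega)
      (by rw [hts]; intro x hx; rcases List.mem_append.1 hx with h' | h'
          · exact h0 x h'
          · simp at h'; omega)
      (by rw [hts]; intro x hx
          rcases pbu_mem_drop_append (a.take j) q x hx with h' | h'
          · exact h1 x h'
          · omega)
    rcases hres : pbuInner b (a.set j q) q (y - q) (j + 1) with ⟨a1, y1, j1⟩
    rw [hres] at ihh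
    rcases ihh with ⟨hE, hrest⟩
    refine ⟨?_, hrest⟩
    rw [hts] at hE
    push_cast at hE
    rw [show q + (y - q) = y from by ring] at hE
    rw [pbuRec, if_pos (by constructor <;> omega : 1 < b - (j : Int) ∧ q ≤ (q + y) - q)]
    rw [show q + y - q = y from by ring, show b - (j : Int) - 1 = b - ((j : Int) + 1) from by ring]
    have hsnoc := pbuRem_snoc b n (a.take j) q
    rw [hlt] at hsnoc
    rw [show n - (a.take j).sum = q + y from by omega] at hsnoc
    simp only [List.map_append, List.map_map, List.append_assoc]
    rw [← hsnoc]
    rw [← hE]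
    congr 1
    apply List.map_congr_left
    intro r _
    simp
  | case2 a y j hguard =>
    intro hlen hjl hq hy hsum h0 h1
    have hlt : ((a.take j).length : Int) = (j : Int) := by
      rw [List.length_take]; omega
    have hsl := pbu_sum_len (a.take j) h0 h1
    rw [hlt] at hsl
    have hjn : (j : Int) ≤ n := by omega
    have hjlt : j < a.length := by omega
    have hts : (a.set j (q + y)).take (j + 1) = a.take j ++ [q + y] :=
      pbu_take_succ_set a j (q + y) hjlt
    have htj : (a.set j (q + y)).take j = a.take j := pbu_take_set_self a j (q + y)
    have hrec : pbuRec (q + y) (b - (j : Int)) q = [[q + y]] := by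
      rw [pbuRec, if_neg]
      intro ⟨c1, c2⟩
      exact hguard ⟨by omega, by omega⟩
    refine ⟨?_, by simpa using hlen, by rw [hts, htj], ?_, ?_, ?_, by omega⟩
    · rw [hrec, hts, htj]; simp
    · rw [hts]; simp; omega
    · rw [htj]; exact h0
    · rw [htj]; exact h1

-- A's outer loop, started from any yielded state, emits exactly pbuRem of the current prefix.
theorem pbu_loop_eq (b n : Int) :
    ∀ (fuel : Nat) (a : List Int) (k : Nat),
    a.length = (n + 1).toNat →
    k ≤ a.length →
    (a.take (k + 1)).sum = n →
    (∀ x ∈ a.take k, 0 ≤ x) →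
    (∀ x ∈ (a.take k).drop 1, 1 ≤ x) →
    (k = 0 ∨ 1 ≤ n - (a.take k).sum) →
    (pbuRem b n (a.take k)).length ≤ fuel →
    pbuLoop b fuel a k = pbuRem b n (a.take k) := by
  intro fuel
  induction fuel with
  | zero =>
    intro a k hlen hk hsum h0 h1 hlast hfuel
    cases k with
    | zero => simp [pbuLoop, pbuRem]
    | succ k' =>
      exfalso
      have hlast' := hlast.resolve_left (by omega)
      rcases hcase : a.take (k' + 1) with _ | ⟨c, tl⟩
      · rcases List.take_eq_nil_iff.1 hcase with h' | h'
        · omega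
        · rw [hcase] at hlast'
          rw [h'] at hlen
          simp at hlast' hlen
          omega
      · rw [hcase] at hfuel
        simp only [pbuRem, List.length_append, List.length_map, Nat.le_zero] at hfuel
        have := pbuRec_ne_nil n b (c + 1)
        have : (pbuRec n b (c + 1)).length ≠ 0 := by
          simpa [List.length_eq_zero_iff] using this
        omega
  | succ f ih =>
    intro a k hlen hk hsum h0 h1 hlast hfuel
    cases k with
    | zero => simp [pbuLoop, pbuRem]
    | succ k' =>
      have hlast' := hlast.resolve_left (by omega)
      have hlt : ((a.take (k' + 1)).length : Int) = ((k' : Int) + 1) := by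
        rw [List.length_take]; push_cast; omega
      have hsl := pbu_sum_len (a.take (k' + 1)) h0 h1
      rw [hlt] at hsl
      have hkn : ((k' : Int)) + 1 ≤ n := by omega
      have hk1 : k' < a.length := by omega
      have hk2 : k' + 1 < a.length := by omega
      have hsplit1 : a.take (k' + 1) = a.take k' ++ [a.getD k' 0] :=
        pbu_take_succ_getD a k' hk1
      have hsplit2 : a.take (k' + 2) = a.take (k' + 1) ++ [a.getD (k' + 1) 0] :=
        pbu_take_succ_getD a (k' + 1) hk2
      set p := a.getD k' 0 with hp
      set L := a.getD (k' + 1) 0 with hL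
      have hsum1 : (a.take k').sum + p = (a.take (k' + 1)).sum := by
        rw [hsplit1]; simp
      have hsum2 : (a.take (k' + 1)).sum + L = n := by
        have : (a.take (k' + 2)).sum = n := hsum
        rw [hsplit2] at this; simp at this; omega
      have hL1 : 1 ≤ L := by omega
      have hp0 : 0 ≤ p := by
        apply h0
        rw [hsplit1]
        exact List.mem_append_right _ (by simp)
      rcases hinner : pbuInner b a (p + 1) (L - 1) k' with ⟨a1, y1, j1⟩
      have hD := pbu_descent b n k' a (p + 1) (L - 1) hlen (by omega) (by omega) (by omega)
        (by omega)
        (fun x hx => h0 x (by rw [hsplit1]; exact List.mem_append_left _ hx))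
        (fun x hx => h1 x (by rw [hsplit1]; exact pbu_mem_drop_append_left _ _ x hx))
      rw [hinner] at hD
      rcases hD with ⟨hE, hlen2, hTake, hsum2', h0', h1', hqy⟩
      -- rewrite the goal's RHS using the snoc decomposition and hE
      have hltk : ((a.take k').length : Int) = (k' : Int) := by
        rw [List.length_take]; omega
      have hRem : pbuRem b n (a.take (k' + 1))
          = ((a1.set j1 (p + 1 + y1)).take (j1 + 1))
              :: pbuRem b n ((a1.set j1 (p + 1 + y1)).take j1) := by
        rw [hsplit1, pbuRem_snoc b n (a.take k') p]
        rw [show ((a.take k').length : Int) = (k' : Int) from hltk]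
        rw [show n - (a.take k').sum = (p + 1) + (L - 1) by omega]
        exact hE
      rw [hRem]
      -- unfold one iteration of the loop
      have hstep : pbuLoop b (f + 1) a (k' + 1)
          = ((a1.set j1 (p + 1 + y1)).take (j1 + 1))
              :: pbuLoop b f (a1.set j1 (p + 1 + y1)) j1 := by
        simp only [pbuLoop]
        rw [if_neg (Nat.succ_ne_zero k')]
        simp only [Nat.add_sub_cancel]
        rw [← hp, ← hL, hinner]
      rw [hstep]
      congr 1
      -- invariants for the next iteration
      have hj1len : j1 < (a1.set j1 (p + 1 + y1)).length := by
        have := congrArg List.length hTake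
        simp only [List.length_take, List.length_append, List.length_cons,
          List.length_nil] at this
        omega
      apply ih
      · exact hlen2
      · omega
      · exact hsum2'
      · exact h0'
      · exact h1'
      · right
        have := congrArg List.sum hTake
        simp at this
        omega
      · have := congrArg List.length hRem
        simp only [List.length_cons] at this
        omega


theorem pbu_take_stable (path : List Int) (d e : Nat) (v : Int) (he : e ≤ d)
    (hd : d ≤ path.length) : (path.take d ++ [v]).take e = path.take e := by
  rw [List.take_append_of_le_length (by rw [List.length_take]; omega), List.take_take]
  congr 1
  omega

-- B's stack machine enumerates, frame by frame, exactly the branch trees pbuRec,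
-- each behind its recorded prefix of `path`, padded with zeros.
theorem pbuStack_eq (bk : Int) :
    ∀ (fuel : Nat) (path : List Int) (stack : List (Nat × Int × Int × Int)),
    List.Pairwise (fun f g => g.1 ≤ f.1) stack →
    (∀ f ∈ stack, f.1 ≤ path.length) →
    (stack.map (fun f => 2 * (pbuRec f.2.1 f.2.2.1 f.2.2.2).length - 1)).sum ≤ fuel →
    pbuStack bk fuel path stack
      = ((stack.map (fun f =>
            (pbuRec f.2.1 f.2.2.1 f.2.2.2).map (fun r => path.take f.1 ++ r))).flatten).map
          (fun part => part ++ List.replicate (bk - (part.length : Int)).toNat 0) := by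
  intro fuel
  induction fuel with
  | zero =>
    intro path stack hpw hbd hfuel
    cases stack with
    | nil => simp [pbuStack]
    | cons fr rest =>
      exfalso
      have h1 : (pbuRec fr.2.1 fr.2.2.1 fr.2.2.2).length ≠ 0 := by
        simpa [List.length_eq_zero_iff] using pbuRec_ne_nil fr.2.1 fr.2.2.1 fr.2.2.2
      simp only [List.map_cons, List.sum_cons, Nat.le_zero] at hfuel
      omega
  | succ f ih =>
    intro path stack hpw hbd hfuel
    match stack with
    | [] => simp [pbuStack]
    | (d, n, k, p) :: rest =>
      have hd : d ≤ path.length := hbd (d, n, k, p) (by simp)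
      have hrest_le : ∀ g ∈ rest, g.1 ≤ d := fun g hg => (List.pairwise_cons.1 hpw).1 g hg
      have hL1 : (pbuRec (n - p) (k - 1) p).length ≠ 0 := by
        simpa [List.length_eq_zero_iff] using pbuRec_ne_nil (n - p) (k - 1) p
      have hL2 : (pbuRec n k (p + 1)).length ≠ 0 := by
        simpa [List.length_eq_zero_iff] using pbuRec_ne_nil n k (p + 1)
      by_cases hguard : 1 < k ∧ p ≤ n - p
      · have hsplit : pbuRec n k p
            = ((pbuRec (n - p) (k - 1) p).map (fun rest => p :: rest)) ++ pbuRec n k (p + 1) := by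
          rw [pbuRec, if_pos hguard]
        have hlen' : (path.take d ++ [p]).length = d + 1 := by
          simp [List.length_take]; omega
        have hfull : (path.take d ++ [p]).take (d + 1) = path.take d ++ [p] := by
          apply List.take_of_length_le
          omega
        have hself : (path.take d ++ [p]).take d = path.take d :=
          pbu_take_stable path d d p le_rfl hd
        have ihh := ih (path.take d ++ [p])
          ((d + 1, n - p, k - 1, p) :: (d, n, k, p + 1) :: rest)
          (by refine List.pairwise_cons.2 ⟨?_, List.pairwise_cons.2 ⟨hrest_le, (List.pairwise_cons.1 hpw).2⟩⟩
              intro g hg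
              rcases List.mem_cons.1 hg with h' | h'
              · subst h'; omega
              · have := hrest_le g h'; omega)
          (by intro g hg
              rcases List.mem_cons.1 hg with h' | h'
              · subst h'; omega
              · rcases List.mem_cons.1 h' with h'' | h''
                · subst h''; omega
                · have := hrest_le g h''; omega)
          (by simp only [List.map_cons, List.sum_cons] at hfuel ⊢
              rw [hsplit] at hfuel
              simp only [List.length_append, List.length_map] at hfuel
              omega)
        rw [pbuStack, if_pos hguard, ihh]
        have hrestm : rest.map (fun g =>
              (pbuRec g.2.1 g.2.2.1 g.2.2.2).map (fun r => (path.take d ++ [p]).take g.1 ++ r))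
            = rest.map (fun g =>
              (pbuRec g.2.1 g.2.2.1 g.2.2.2).map (fun r => path.take g.1 ++ r)) := by
          apply List.map_congr_left
          intro g hg
          rw [pbu_take_stable path d g.1 p (hrest_le g hg) hd]
        simp only [List.map_cons, List.flatten_cons, hfull, hself, hrestm]
        rw [hsplit]
        simp [List.map_append, List.map_map, List.append_assoc, Function.comp]
      · have hrec : pbuRec n k p = [[n]] := by rw [pbuRec, if_neg hguard]
        rw [pbuStack, if_neg hguard]
        rw [ih path rest (List.pairwise_cons.1 hpw).2
          (fun g hg => hbd g (List.mem_cons_of_mem _ hg))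
          (by simp only [hrec, List.map_cons, List.sum_cons, List.length_cons,
                List.length_nil] at hfuel
              omega)]
        simp [hrec, List.length_take]
        omega

-- ===== VERDICT =====
theorem partition_buckets_unique_spec : Claim_equal_partition_buckets_unique := by
  intro number buckets _ hpre
  unfold Spec_partition_buckets_unique
  unfold partition_buckets_unique partition_buckets_unique_alt
  by_cases h0 : number = 0
  · rw [if_pos h0, if_pos h0]
  · rw [if_neg h0, if_neg h0]
    have hn1 : 1 ≤ number := by
      have : 0 ≤ number := hpre
      omega
    have hm : (number + 1).toNat = (number - 1).toNat + 2 := by omega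
    dsimp only
    have ha0 : ((List.replicate (number + 1).toNat 0).set 0 0).set 1 number
        = 0 :: number :: List.replicate (number - 1).toNat 0 := by
      rw [hm]
      simp [List.replicate_succ]
    rw [ha0]
    set a0 : List Int := 0 :: number :: List.replicate (number - 1).toNat 0 with ha0def
    have hlen : a0.length = (number + 1).toNat := by
      rw [ha0def]; simp; omega
    have ht1 : a0.take 1 = [0] := by rw [ha0def]; simp
    have ht2 : a0.take 2 = [0, number] := by rw [ha0def]; simp [List.take_succ_cons]
    have hrem0 : pbuRem buckets number [0] = pbuRec number buckets 1 := by
      simp [pbuRem]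
    have hfuel : (pbuRem buckets number (a0.take 1)).length ≤ 2 ^ number.toNat := by
      rw [ht1, hrem0]
      calc (pbuRec number buckets 1).length
          ≤ 2 ^ (number - 1).toNat := pbuRec_length number buckets 1 le_rfl
        _ ≤ 2 ^ number.toNat := Nat.pow_le_pow_right (by norm_num) (by omega)
    have hloop := pbu_loop_eq buckets number (2 ^ number.toNat) a0 1 hlen
      (by rw [hlen]; omega)
      (by rw [ht2]; simp)
      (by rw [ht1]; intro x hx; simp at hx; omega)
      (by rw [ht1]; intro x hx; simp at hx)
      (by right; rw [ht1]; simp; omega)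
      hfuel
    rw [hloop, ht1, hrem0]
    have hflen : ([(((0:Nat), number, buckets, (1:Int)))].map
        (fun f => 2 * (pbuRec f.2.1 f.2.2.1 f.2.2.2).length - 1)).sum ≤ 2 ^ (number.toNat + 1) := by
      simp only [List.map_cons, List.map_nil, List.sum_cons, List.sum_nil]
      have h1 := pbuRec_length number buckets 1 le_rfl
      have h2 : 2 ^ (number - 1).toNat ≤ 2 ^ number.toNat :=
        Nat.pow_le_pow_right (by norm_num) (by omega)
      have h3 : 2 ^ (number.toNat + 1) = 2 * 2 ^ number.toNat := by rw [Nat.pow_succ]; ring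
      omega
    rw [pbuStack_eq buckets (2 ^ (number.toNat + 1)) [] [(0, number, buckets, 1)]
      (by simp) (by simp) hflen]
    simp only [List.map_cons, List.map_nil, List.flatten_cons, List.flatten_nil,
      List.take_nil, List.nil_append, List.append_nil, List.map_id']
    apply List.map_congr_left
    intro part _
    dsimp only
    by_cases hc : buckets - ((part.length : Int)) > 0
    · rw [if_pos hc]
    · rw [if_neg hc]
      have : (buckets - ((part.length : Int))).toNat = 0 := by omega
      rw [this]
      simp
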